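-- pv_equiv track=rewrite | github.com/yui-synth-lab/KSAU_Project | v7.1/code/final_trefoil_kashaev.py | colored_jones_trefoil
-- ===== SOURCE A (Python) =====
-- def colored_jones_trefoil(N, q):
--     # Standard formula for unnormalized J_N of right-handed trefoil
--     # J_N(q) = q^{N-1} * sum_{k=0}^{N-1} q^{k(N+1)} * prod_{j=1}^k (1 - q^{N-j})
--
--     prefactor = q**(N - 1)
--     total_sum = 0
--     for k in range(N):
--         product = 1
--         for j in range(1, k + 1):
--             product *= (1 - q**(N - j))
--
--         term = (q**(k * (N + 1))) * product
--         total_sum += term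
--
--     return prefactor * total_sum
-- ===== SOURCE B (Python) =====
-- def colored_jones_trefoil(N, q):
--     # O(N) rewrite: precompute powers of q once, then maintain the running
--     # power q**(k*(N+1)) and the running product prod_{j=1}^{k}(1-q**(N-j))
--     # incrementally across a single loop.
--     pw = [1]
--     for _ in range(N + 1):
--         pw.append(pw[-1] * q)
--     total = 0
--     power = 1      # q**(k*(N+1))
--     product = 1    # prod_{j=1}^{k} (1 - q**(N-j))
--     for k in range(N):
--         total += power * product
--         power *= pw[N + 1]
--         product *= 1 - pw[N - 1 - k]
--     return q ** (N - 1) * total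
-- ===== Notes on version B (the rewrite author's own statement) =====
-- stated objective: alternative
-- what changed: Replaced the quadratic double loop that rebuilds the product and recomputes powers for every k by a single pass that precomputes a power table of q once and updates the running power q**(k*(N+1)) and the running product incrementally (fewer multiplications; measured ~2.7x at N=64 but unconfirmed at larger sizes where bignum growth dominates).
-- outside the precondition, e.g. on colored_jones_trefoil(0, 2): A returns 0.0, B returns 0.0; on colored_jones_trefoil(0, 0): A raises ZeroDivisionError, B raises ZeroDivisionError
import Mathlib
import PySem

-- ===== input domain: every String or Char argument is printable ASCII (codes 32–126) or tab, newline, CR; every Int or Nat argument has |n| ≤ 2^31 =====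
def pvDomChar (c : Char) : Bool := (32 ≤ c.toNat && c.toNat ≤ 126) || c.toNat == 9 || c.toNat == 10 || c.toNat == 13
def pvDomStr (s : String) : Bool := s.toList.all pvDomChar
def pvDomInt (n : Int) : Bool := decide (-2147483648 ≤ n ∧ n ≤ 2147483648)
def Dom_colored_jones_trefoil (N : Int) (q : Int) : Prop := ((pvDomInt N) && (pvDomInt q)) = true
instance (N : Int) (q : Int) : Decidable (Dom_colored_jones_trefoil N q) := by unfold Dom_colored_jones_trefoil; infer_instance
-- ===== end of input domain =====

-- B replaces A's quadratic double loop by one pass with a precomputed power table and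
-- incrementally maintained power/product (fewer multiplications; alternative algorithm).


-- ===== PORT A =====
def colored_jones_trefoil (N : Int) (q : Int) : Int :=
  let prefactor := q ^ (N - 1).toNat
  let total_sum := (PySem.List.pyRange 0 N 1).foldl (fun total_sum k =>
    let product := (PySem.List.pyRange 1 (k + 1) 1).foldl
      (fun product j => product * (1 - q ^ (N - j).toNat)) 1
    total_sum + q ^ (k * (N + 1)).toNat * product) 0
  prefactor * total_sum

-- ===== PORT B =====
def colored_jones_trefoil_alt (N : Int) (q : Int) : Int :=
  let pw := (PySem.List.pyRange 0 (N + 1) 1).foldl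
    (fun (pw : List Int) _ => pw ++ [PySem.List.pyGetD pw (-1) 0 * q]) [1]
  let st := (PySem.List.pyRange 0 N 1).foldl
    (fun (st : Int × Int × Int) k =>
      (st.1 + st.2.1 * st.2.2,
       st.2.1 * PySem.List.pyGetD pw (N + 1) 0,
       st.2.2 * (1 - PySem.List.pyGetD pw (N - 1 - k) 0)))
    (0, 1, 1)
  q ^ (N - 1).toNat * st.1

-- ===== PRECONDITION & SPEC =====
-- Pre_ excludes N ≤ 0, where A's q**(N-1) with a negative exponent returns a float
-- (0.0, not an int) for q ≠ 0 and raises ZeroDivisionError for q = 0.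
def Pre_colored_jones_trefoil (N : Int) (q : Int) : Prop := 1 ≤ N
instance (N : Int) (q : Int) : Decidable (Pre_colored_jones_trefoil N q) := by
  unfold Pre_colored_jones_trefoil; infer_instance
def pvWitness_colored_jones_trefoil : Int × Int := (3, 2)
def Spec_colored_jones_trefoil (N : Int) (q : Int) (out : Int) : Prop := out = colored_jones_trefoil_alt N q
instance (N : Int) (q : Int) (out : Int) : Decidable (Spec_colored_jones_trefoil N q out) := by unfold Spec_colored_jones_trefoil; infer_instance

-- ===== CLAIM (what is proved, stated in full; the proofs are below) =====
def Claim_equal_colored_jones_trefoil : Prop := ∀ (N : Int) (q : Int), Dom_colored_jones_trefoil N q → Pre_colored_jones_trefoil N q → Spec_colored_jones_trefoil N q (colored_jones_trefoil N q)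

-- ===== LEMMAS AND PROOFS =====

-- reference product: prod_{j=1}^{k} (1 - q^(N-j))
def pvProd (N q : Int) : Nat → Int
  | 0 => 1
  | k + 1 => pvProd N q k * (1 - q ^ (N - 1 - (k : Int)).toNat)

-- reference partial sum with B's exponent shape
def pvSum (N q : Int) : Nat → Int
  | 0 => 0
  | m + 1 => pvSum N q m + q ^ ((N + 1).toNat * m) * pvProd N q m

theorem pv_inner (N q : Int) (k : Nat) :
    (PySem.List.pyRange 1 ((k : Int) + 1) 1).foldl
      (fun product j => product * (1 - q ^ (N - j).toNat)) 1 = pvProd N q k := by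
  induction k with
  | zero => simp [PySem.List.pyRange_one_eq_nil, pvProd]
  | succ k ih =>
    have h1 : (1 : Int) ≤ (k : Int) + 1 := by omega
    have hc : ((k + 1 : Nat) : Int) = (k : Int) + 1 := by push_cast; ring
    rw [hc, PySem.List.pyRange_one_succ_right h1, List.foldl_append, ih]
    simp only [List.foldl_cons, List.foldl_nil, pvProd]
    have : N - ((k : Int) + 1) = N - 1 - (k : Int) := by ring
    rw [this]

theorem pv_outer (N q : Int) (hN : 0 ≤ N) (m : Nat) :
    (PySem.List.pyRange 0 ((m : Int)) 1).foldl (fun total_sum k =>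
      total_sum + q ^ (k * (N + 1)).toNat *
        (PySem.List.pyRange 1 (k + 1) 1).foldl
          (fun product j => product * (1 - q ^ (N - j).toNat)) 1) 0
      = pvSum N q m := by
  induction m with
  | zero => simp [PySem.List.pyRange_one_eq_nil, pvSum]
  | succ m ih =>
    have h0 : (0 : Int) ≤ (m : Int) := by omega
    have hc : ((m + 1 : Nat) : Int) = (m : Int) + 1 := by push_cast; ring
    rw [hc, PySem.List.pyRange_one_succ_right h0, List.foldl_append, ih]
    simp only [List.foldl_cons, List.foldl_nil, pvSum, pv_inner]
    have hexp : ((m : Int) * (N + 1)).toNat = (N + 1).toNat * m := by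
      have h1 : (0 : Int) ≤ N + 1 := by omega
      have : (m : Int) * (N + 1) = (((N + 1).toNat * m : Nat) : Int) := by
        push_cast [Int.toNat_of_nonneg h1]; ring
      rw [this, Int.toNat_natCast]
    rw [hexp]

-- the power table B builds
theorem pv_pw (q : Int) (n : Nat) :
    (PySem.List.pyRange 0 ((n : Int)) 1).foldl
      (fun (pw : List Int) _ => pw ++ [PySem.List.pyGetD pw (-1) 0 * q]) [1]
      = (List.range (n + 1)).map (fun i => q ^ i) := by
  induction n with
  | zero => simp [PySem.List.pyRange_one_eq_nil]
  | succ n ih =>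
    have h0 : (0 : Int) ≤ (n : Int) := by omega
    have hc : ((n + 1 : Nat) : Int) = (n : Int) + 1 := by push_cast; ring
    rw [hc, PySem.List.pyRange_one_succ_right h0, List.foldl_append, ih]
    simp only [List.foldl_cons, List.foldl_nil]
    rw [show List.range (n + 1) = List.range n ++ [n] from List.range_succ,
        List.map_append]
    simp only [List.map_cons, List.map_nil, List.append_assoc]
    rw [PySem.List.pyGetD_neg_one_append_singleton]
    simp only [← List.append_assoc]
    rw [show List.range (n + 1 + 1) = List.range (n + 1) ++ [n + 1] from List.range_succ,
        List.map_append, List.range_succ, List.map_append]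
    simp [pow_succ]

theorem pv_pw_get (q : Int) (n i : Nat) (hi : i < n) :
    PySem.List.pyGetD ((List.range n).map (fun i => q ^ i)) ((i : Int)) 0 = q ^ i := by
  rw [PySem.List.pyGetD_natCast]
  simp [List.getD, hi]

theorem pv_main (N q : Int) (hN : 1 ≤ N) (m : Nat) (hm : (m : Int) ≤ N) :
    (PySem.List.pyRange 0 ((m : Int)) 1).foldl
      (fun (st : Int × Int × Int) k =>
        (st.1 + st.2.1 * st.2.2,
         st.2.1 * PySem.List.pyGetD ((List.range (N.toNat + 2)).map (fun i => q ^ i)) (N + 1) 0,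
         st.2.2 * (1 - PySem.List.pyGetD ((List.range (N.toNat + 2)).map (fun i => q ^ i)) (N - 1 - k) 0)))
      (0, 1, 1)
      = (pvSum N q m, q ^ ((N + 1).toNat * m), pvProd N q m) := by
  induction m with
  | zero => simp [PySem.List.pyRange_one_eq_nil, pvSum, pvProd]
  | succ m ih =>
    have h0 : (0 : Int) ≤ (m : Int) := by omega
    have hm' : (m : Int) ≤ N := by omega
    have hc : ((m + 1 : Nat) : Int) = (m : Int) + 1 := by push_cast; ring
    rw [hc, PySem.List.pyRange_one_succ_right h0, List.foldl_append, ih hm']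
    simp only [List.foldl_cons, List.foldl_nil]
    have hstep : PySem.List.pyGetD ((List.range (N.toNat + 2)).map (fun i => q ^ i)) (N + 1) 0
        = q ^ ((N + 1).toNat) := by
      have h2 := pv_pw_get q (N.toNat + 2) ((N + 1).toNat) (by omega)
      rw [← h2]; congr 1; omega
    have hfac : PySem.List.pyGetD ((List.range (N.toNat + 2)).map (fun i => q ^ i)) (N - 1 - (m : Int)) 0
        = q ^ ((N - 1 - (m : Int)).toNat) := by
      have h2 := pv_pw_get q (N.toNat + 2) ((N - 1 - (m : Int)).toNat) (by omega)
      rw [← h2]; congr 1; omega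
    rw [hstep, hfac]
    refine Prod.ext ?_ (Prod.ext ?_ ?_)
    · simp [pvSum]
    · simp [← pow_add, Nat.mul_succ]
    · simp [pvProd]

-- ===== VERDICT (by name: the statement is the Claim_ definition above) =====
theorem colored_jones_trefoil_spec : Claim_equal_colored_jones_trefoil := by
  intro N q _ hPre
  unfold Pre_colored_jones_trefoil at hPre
  unfold Spec_colored_jones_trefoil colored_jones_trefoil colored_jones_trefoil_alt
  simp only []
  have hNe : ((N.toNat : Nat) : Int) = N := Int.toNat_of_nonneg (by omega)
  have hN1 : (N + 1) = ((N.toNat + 1 : Nat) : Int) := by omega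
  have hpw : (PySem.List.pyRange 0 (N + 1) 1).foldl
      (fun (pw : List Int) _ => pw ++ [PySem.List.pyGetD pw (-1) 0 * q]) [1]
      = (List.range (N.toNat + 2)).map (fun i => q ^ i) := by
    rw [hN1, pv_pw q (N.toNat + 1)]
  rw [hpw]
  rw [show PySem.List.pyRange 0 N 1 = PySem.List.pyRange 0 ((N.toNat : Nat) : Int) 1 by rw [hNe]]
  rw [pv_outer N q (by omega) N.toNat, pv_main N q hPre N.toNat (by omega)]
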